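-- pv_equiv track=rewrite | github.com/TripleMCodes/M-Prosody-Desktop | services/flow_analysis.py | highlight_flow
-- ===== SOURCE A (Python) =====
-- from typing import List, Optional
--
-- def highlight_flow(patterns: List[str], lines: List[str]) -> str:
--     """Return HTML showing flow patterns with color coding."""
--     max_len = max(len(p) for p in patterns) if patterns else 0
--     padded = [p.ljust(max_len) for p in patterns]
--
--     # Determine alignment per column
--     column_alignment: List[Optional[bool]] = []
--     for i in range(max_len):
--         column = [p[i] for p in padded if p[i] != ' ']
--         if not column:
--             column_alignment.append(None)
--         elif all(c == column[0] for c in column):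
--             column_alignment.append(True)
--         else:
--             column_alignment.append(False)
--
--     html_lines: List[str] = []
--     for line, pattern in zip(lines, padded):
--         colored_pattern = ""
--         for char, aligned in zip(pattern, column_alignment):
--             if char == 'S':
--                 color = "green" if aligned else "red"
--                 colored_pattern += f"<span style='color:{color};font-weight:bold'>{char}</span>"
--             elif char == 'u':
--                 colored_pattern += "<span style='color:gray'>u</span>"
--             else:
--                 colored_pattern += " "
--         html_lines.append(f"<b>{line}</b><br>{colored_pattern}<br><br>")
--
--     return "".join(html_lines)
-- ===== SOURCE B (Python) =====
-- from typing import List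
--
-- def highlight_flow(patterns: List[str], lines: List[str]) -> str:
--     """Return HTML showing flow patterns with color coding (row-major alignment pass)."""
--     max_len = max(len(p) for p in patterns) if patterns else 0
--     padded = [p.ljust(max_len) for p in patterns]
--
--     # Row-major pass: maintain (first_char, consistent) per column instead of
--     # collecting each column and calling all().
--     state = [(None, True)] * max_len
--     for p in padded:
--         state = [_step(s, c) for s, c in zip(state, p)]
--     greens = [fc is not None and cons for fc, cons in state]
--
--     html_lines: List[str] = []
--     for line, pattern in zip(lines, padded):
--         colored_pattern = ""
--         for char, green in zip(pattern, greens):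
--             if char == 'S':
--                 color = "green" if green else "red"
--                 colored_pattern += f"<span style='color:{color};font-weight:bold'>{char}</span>"
--             elif char == 'u':
--                 colored_pattern += "<span style='color:gray'>u</span>"
--             else:
--                 colored_pattern += " "
--         html_lines.append(f"<b>{line}</b><br>{colored_pattern}<br><br>")
--
--     return "".join(html_lines)
--
--
-- def _step(s, c):
--     if c == ' ':
--         return s
--     fc, cons = s
--     if fc is None:
--         return (c, cons)
--     return (fc, cons and c == fc)
-- ===== Notes on version B (the rewrite author's own statement) =====
-- stated objective: alternative
-- what changed: Replaces the column-major alignment computation (collecting each column list and calling all()) with a single row-major pass maintaining incremental (first_char, consistent) state per column, from which a boolean green-flag per column is derived.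
import Mathlib
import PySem

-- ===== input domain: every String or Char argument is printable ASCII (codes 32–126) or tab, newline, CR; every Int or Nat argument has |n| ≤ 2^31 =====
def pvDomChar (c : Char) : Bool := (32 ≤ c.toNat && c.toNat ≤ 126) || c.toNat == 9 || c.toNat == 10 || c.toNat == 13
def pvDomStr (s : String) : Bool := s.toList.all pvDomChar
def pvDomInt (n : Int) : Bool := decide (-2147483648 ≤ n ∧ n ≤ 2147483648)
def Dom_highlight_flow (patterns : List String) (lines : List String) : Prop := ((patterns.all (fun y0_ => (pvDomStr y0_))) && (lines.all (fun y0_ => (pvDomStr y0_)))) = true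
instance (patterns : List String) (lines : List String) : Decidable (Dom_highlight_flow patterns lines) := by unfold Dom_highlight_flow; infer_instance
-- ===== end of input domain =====

-- B replaces the column-major alignment computation by a single row-major pass
-- maintaining (first_char, consistent) state per column (alternative decomposition, same cost).

-- ===== PORT A =====
-- shared with B (the same two Python lines appear verbatim in both sources):
def pvMaxLen (patterns : List String) : Nat :=
  match patterns with
  | [] => 0
  | p :: ps => ps.foldl (fun m q => max m q.toList.length) p.toList.length

def pvLjust (p : List Char) (n : Nat) : List Char := p ++ List.replicate (n - p.length) ' '

-- column = [p[i] for p in padded if p[i] != ' ']; then None / all(c == column[0]) test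
def pvColAlignA (padded : List (List Char)) (i : Nat) : Option Bool :=
  let column := padded.foldr (fun p acc => if p.getD i ' ' ≠ ' ' then p.getD i ' ' :: acc else acc) []
  match column with
  | [] => none
  | c0 :: _ => some (column.all (fun c => c == c0))

def pvColorA (c : Char) (aligned : Option Bool) : String :=
  if c == 'S' then
    let color := if aligned == some true then "green" else "red"
    "<span style='color:" ++ color ++ ";font-weight:bold'>" ++ String.singleton c ++ "</span>"
  else if c == 'u' then "<span style='color:gray'>u</span>"
  else " "

def highlight_flow (patterns : List String) (lines : List String) : String :=
  let maxLen := pvMaxLen patterns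
  let padded := patterns.map (fun p => pvLjust p.toList maxLen)
  let alignList := (List.range maxLen).map (pvColAlignA padded)
  let htmlLines := (lines.zip padded).map (fun lp =>
    let colored := (lp.2.zip alignList).foldl (fun acc ca => acc ++ pvColorA ca.1 ca.2) ""
    "<b>" ++ lp.1 ++ "</b><br>" ++ colored ++ "<br><br>")
  htmlLines.foldl (· ++ ·) ""

-- ===== PORT B =====
def pvStepC (s : Option Char × Bool) (c : Char) : Option Char × Bool :=
  if c == ' ' then s
  else match s.1 with
    | none => (some c, s.2)
    | some f => (s.1, s.2 && (c == f))

def pvStepRow (st : List (Option Char × Bool)) (row : List Char) : List (Option Char × Bool) :=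
  List.zipWith (fun s c => pvStepC s c) st row

def pvColorB (c : Char) (g : Bool) : String :=
  if c == 'S' then
    let color := if g then "green" else "red"
    "<span style='color:" ++ color ++ ";font-weight:bold'>" ++ String.singleton c ++ "</span>"
  else if c == 'u' then "<span style='color:gray'>u</span>"
  else " "

def highlight_flow_alt (patterns : List String) (lines : List String) : String :=
  let maxLen := pvMaxLen patterns
  let padded := patterns.map (fun p => pvLjust p.toList maxLen)
  let finalSt := padded.foldl pvStepRow (List.replicate maxLen (none, true))
  let greens := finalSt.map (fun s => s.1.isSome && s.2)
  let htmlLines := (lines.zip padded).map (fun lp =>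
    let colored := (lp.2.zip greens).foldl (fun acc cg => acc ++ pvColorB cg.1 cg.2) ""
    "<b>" ++ lp.1 ++ "</b><br>" ++ colored ++ "<br><br>")
  htmlLines.foldl (· ++ ·) ""

-- ===== PRECONDITION & SPEC =====
def Spec_highlight_flow (patterns : List String) (lines : List String) (out : String) : Prop := out = highlight_flow_alt patterns lines
instance (patterns : List String) (lines : List String) (out : String) : Decidable (Spec_highlight_flow patterns lines out) := by unfold Spec_highlight_flow; infer_instance

-- ===== CLAIM (what is proved, stated in full; the proofs are below) =====
def Claim_equal_highlight_flow : Prop := ∀ (patterns : List String) (lines : List String), Dom_highlight_flow patterns lines → Spec_highlight_flow patterns lines (highlight_flow patterns lines)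

-- ===== LEMMAS AND PROOFS =====

theorem foldl_max_init (ps : List String) (a : Nat) :
    a ≤ ps.foldl (fun m q => max m q.toList.length) a := by
  induction ps generalizing a with
  | nil => simp
  | cons p ps ih => exact le_trans (le_max_left _ _) (ih _)

theorem foldl_max_mem (ps : List String) (q : String) (hq : q ∈ ps) (a : Nat) :
    q.toList.length ≤ ps.foldl (fun m q => max m q.toList.length) a := by
  induction ps generalizing a with
  | nil => simp at hq
  | cons p ps ih =>
    rcases List.mem_cons.mp hq with h | h
    · subst h; exact le_trans (le_max_right _ _) (foldl_max_init ps _)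
    · exact ih h _

theorem le_pvMaxLen (patterns : List String) (p : String) (hp : p ∈ patterns) :
    p.toList.length ≤ pvMaxLen patterns := by
  match patterns, hp with
  | q :: ps, hp =>
    show p.toList.length ≤ ps.foldl (fun m q => max m q.toList.length) q.toList.length
    rcases List.mem_cons.mp hp with h | h
    · subst h; exact foldl_max_init ps _
    · exact foldl_max_mem ps p h _

theorem pvLjust_length (p : List Char) (n : Nat) (h : p.length ≤ n) :
    (pvLjust p n).length = n := by
  simp [pvLjust]; omega

theorem pvStepRow_length (st : List (Option Char × Bool)) (row : List Char)
    (h : st.length ≤ row.length) : (pvStepRow st row).length = st.length := by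
  simp [pvStepRow]; omega

theorem foldl_pvStepRow_length (rows : List (List Char)) (st : List (Option Char × Bool))
    (h : ∀ r ∈ rows, st.length ≤ r.length) :
    (rows.foldl pvStepRow st).length = st.length := by
  induction rows generalizing st with
  | nil => rfl
  | cons r rows ih =>
    have h1 : (pvStepRow st r).length = st.length :=
      pvStepRow_length st r (h r (List.mem_cons_self ..))
    rw [List.foldl_cons, ih _ (fun r' hr' => by rw [h1]; exact h r' (List.mem_cons_of_mem _ hr')), h1]

theorem foldl_pvStepRow_get (rows : List (List Char)) (st : List (Option Char × Bool))
    (i : Nat) (hi : i < st.length) (h : ∀ r ∈ rows, st.length ≤ r.length) :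
    (rows.foldl pvStepRow st)[i]? = some (rows.foldl (fun s r => pvStepC s (r.getD i ' ')) st[i]!) := by
  induction rows generalizing st with
  | nil => simp [hi, getElem!_pos]
  | cons r rows ih =>
    have hr : st.length ≤ r.length := h r (List.mem_cons_self ..)
    have hlen : (pvStepRow st r).length = st.length := pvStepRow_length st r hr
    have hi' : i < (pvStepRow st r).length := by omega
    rw [List.foldl_cons, List.foldl_cons,
      ih (pvStepRow st r) hi' (fun r' hr' => by rw [hlen]; exact h r' (List.mem_cons_of_mem _ hr'))]
    congr 1
    have hir : i < r.length := by omega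
    have hget : (pvStepRow st r)[i]? = some (pvStepC st[i]! (r.getD i ' ')) := by
      rw [pvStepRow, List.getElem?_zipWith]
      simp [hi, hir, getElem!_pos, List.getD]
    have := getElem!_pos (pvStepRow st r) i hi'
    rw [List.getElem?_eq_getElem hi'] at hget
    congr 1
    rw [this]
    exact Option.some.inj hget

theorem foldl_pvStepC_some (cs : List Char) (f : Char) (b : Bool) :
    cs.foldl pvStepC (some f, b) = (some f, b && (cs.filter (fun c => c ≠ ' ')).all (fun c => c == f)) := by
  induction cs generalizing b with
  | nil => simp
  | cons c cs ih =>
    by_cases hc : c = ' '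
    · subst hc; simp [pvStepC, ih]
    · simp [pvStepC, hc, ih, Bool.and_assoc]

theorem foldl_pvStepC_none (cs : List Char) :
    cs.foldl pvStepC (none, true) =
      match cs.filter (fun c => c ≠ ' ') with
      | [] => ((none : Option Char), true)
      | f :: rest => (some f, rest.all (fun c => c == f)) := by
  induction cs with
  | nil => rfl
  | cons c cs ih =>
    by_cases hc : c = ' '
    · subst hc; simpa [pvStepC] using ih
    · simp [pvStepC, hc, foldl_pvStepC_some]

theorem colAlign_column (padded : List (List Char)) (i : Nat) :
    padded.foldr (fun p acc => if p.getD i ' ' ≠ ' ' then p.getD i ' ' :: acc else acc) []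
      = (padded.map (fun p => p.getD i ' ')).filter (fun c => c ≠ ' ') := by
  induction padded with
  | nil => rfl
  | cons p padded ih =>
    simp only [List.foldr_cons, List.map_cons, List.filter_cons, ih]
    by_cases h : p.getD i ' ' = ' ' <;> simp_all

theorem green_eq_align (padded : List (List Char)) (i : Nat) (n : Nat) (hi : i < n)
    (h : ∀ r ∈ padded, n ≤ r.length) :
    ((padded.foldl pvStepRow (List.replicate n (none, true))).map (fun s => s.1.isSome && s.2))[i]?
      = some (pvColAlignA padded i == some true) := by
  have hrep : (List.replicate n ((none : Option Char), true)).length = n := by simp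
  have hget := foldl_pvStepRow_get padded (List.replicate n (none, true)) i (by omega)
    (fun r hr => by rw [hrep]; exact h r hr)
  have hinit : (List.replicate n ((none : Option Char), true))[i]! = (none, true) := by
    rw [getElem!_pos (List.replicate n ((none : Option Char), true)) i (by simpa using hi)]
    simp
  rw [List.getElem?_map, hget, hinit]
  have hfold : padded.foldl (fun s r => pvStepC s (r.getD i ' ')) ((none : Option Char), true)
      = (padded.map (fun p => p.getD i ' ')).foldl pvStepC (none, true) := by
    rw [List.foldl_map]
  rw [Option.map_some]
  congr 1
  rw [hfold, foldl_pvStepC_none, pvColAlignA, colAlign_column]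
  cases hfc : (padded.map (fun p => p.getD i ' ')).filter (fun c => c ≠ ' ') with
  | nil => simp
  | cons f rest => simp

theorem pvColorB_eq (c : Char) (a : Option Bool) :
    pvColorB c (a == some true) = pvColorA c a := by
  simp [pvColorA, pvColorB]

theorem colored_eq (pat : List Char) (al : List (Option Bool)) (acc : String) :
    (pat.zip (al.map (fun a => a == some true))).foldl (fun acc cg => acc ++ pvColorB cg.1 cg.2) acc
      = (pat.zip al).foldl (fun acc ca => acc ++ pvColorA ca.1 ca.2) acc := by
  induction pat generalizing al acc with
  | nil => rfl
  | cons c pat ih =>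
    cases al with
    | nil => rfl
    | cons a al => simp [List.zip_cons_cons, ih, pvColorB_eq]

theorem greens_eq (padded : List (List Char)) (n : Nat) (h : ∀ r ∈ padded, n ≤ r.length) :
    ((padded.foldl pvStepRow (List.replicate n ((none : Option Char), true))).map (fun s => s.1.isSome && s.2))
      = ((List.range n).map (pvColAlignA padded)).map (fun a => a == some true) := by
  have hlen : (padded.foldl pvStepRow (List.replicate n ((none : Option Char), true))).length = n := by
    rw [foldl_pvStepRow_length padded _ (fun r hr => by simpa using h r hr)]; simp
  apply List.ext_getElem?
  intro i
  by_cases hi : i < n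
  · rw [green_eq_align padded i n hi h]
    simp [hi]
  · rw [List.getElem?_eq_none (by simpa [hlen] using Nat.le_of_not_lt hi),
      List.getElem?_eq_none (by simpa using Nat.le_of_not_lt hi)]

theorem highlight_flow_spec : Claim_equal_highlight_flow := by
  intro patterns lines _
  unfold Spec_highlight_flow
  simp only [highlight_flow, highlight_flow_alt]
  have hpad : ∀ r ∈ patterns.map (fun p => pvLjust p.toList (pvMaxLen patterns)),
      pvMaxLen patterns ≤ r.length := by
    intro r hr
    rcases List.mem_map.mp hr with ⟨p, hp, rfl⟩
    rw [pvLjust_length _ _ (le_pvMaxLen _ p hp)]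
  rw [greens_eq _ _ hpad]
  simp only [colored_eq]
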